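-- pv_equiv track=rewrite | github.com/ScientiaCapital/sales-agent | backend/app/services/email_extractor.py | _prioritize_emails
-- ===== SOURCE A (Python) =====
-- from typing import List, Set
--
-- def _prioritize_emails(emails: List[str], website: str) -> List[str]:
--     """
--     Prioritize emails by likelihood of decision-maker.
--
--     Priority order:
--     1. Personal names (john.smith@, jane.doe@)
--     2. Sales/business related (sales@, business@)
--     3. Other valid emails
--
--     Args:
--         emails: List of emails to prioritize
--         website: Company website
--
--     Returns:
--         Prioritized list
--     """
--     personal = []
--     business = []
--     other = []
--
--     for email in emails:
--         local_part = email.split('@')[0].lower()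
--
--         # Personal name patterns (firstname.lastname or firstname)
--         if '.' in local_part and len(local_part.split('.')) >= 2:
--             personal.append(email)
--         # Business-related
--         elif any(keyword in local_part for keyword in [
--             'sales', 'business', 'owner', 'ceo', 'president', 'founder'
--         ]):
--             business.append(email)
--         else:
--             other.append(email)
--
--     return personal + business + other
-- ===== SOURCE B (Python) =====
-- from typing import List
--
-- _KEYWORDS = ('sales', 'business', 'owner', 'ceo', 'president', 'founder')
--
--
-- def _local_part(email: str) -> str:
--     return email.split('@')[0].lower()
--
--
-- def _priority(email: str) -> int:
--     local = _local_part(email)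
--     if '.' in local:
--         return 0
--     for keyword in _KEYWORDS:
--         if keyword in local:
--             return 1
--     return 2
--
--
-- def _prioritize_emails(emails: List[str], website: str) -> List[str]:
--     """Same prioritization as a stable sort over a 0/1/2 priority key."""
--     return sorted(emails, key=_priority)
-- ===== Notes on version B (the rewrite author's own statement) =====
-- stated objective: idiomatic
-- what changed: Replaces the three explicit bucket lists and concatenation with a stable sort over a computed 0/1/2 priority key, and simplifies the personal-name test to just "'.' in local" (provably equivalent, since splitting on '.' yields >= 2 parts exactly when '.' occurs).
import Mathlib
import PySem

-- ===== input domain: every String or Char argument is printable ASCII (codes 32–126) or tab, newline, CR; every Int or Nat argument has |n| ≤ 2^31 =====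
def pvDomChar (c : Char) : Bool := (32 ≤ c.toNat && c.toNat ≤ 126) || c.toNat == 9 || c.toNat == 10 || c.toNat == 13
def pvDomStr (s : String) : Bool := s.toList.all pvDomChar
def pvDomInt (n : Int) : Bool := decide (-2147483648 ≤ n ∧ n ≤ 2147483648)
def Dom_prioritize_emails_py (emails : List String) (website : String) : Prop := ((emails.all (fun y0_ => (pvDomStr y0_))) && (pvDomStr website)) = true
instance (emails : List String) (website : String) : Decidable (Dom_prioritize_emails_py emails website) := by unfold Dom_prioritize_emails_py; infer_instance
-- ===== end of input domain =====

-- B replaces A's three explicit bucket lists + concatenation with a single stable sort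
-- over a computed 0/1/2 priority key, and drops A's redundant len(split('.'))>=2 conjunct
-- (idiomatic; same results, no speed claim).


-- ===== PORT A =====
-- A's loop body: classify one email into (personal, business, other).
-- email.split('@')[0] : split('@') is always nonempty, so the [0] index is exact via getD.
def pvStepA (st : List String × List String × List String) (email : String) :
    List String × List String × List String :=
  let local_part := PySem.Str.lower (((PySem.Str.split? email "@").getD []).getD 0 "")
  if PySem.Str.isIn "." local_part &&
      decide (2 ≤ ((PySem.Str.split? local_part ".").getD []).length) then
    (st.1 ++ [email], st.2.1, st.2.2)
  else if (["sales", "business", "owner", "ceo", "president", "founder"]).any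
      (fun keyword => PySem.Str.isIn keyword local_part) then
    (st.1, st.2.1 ++ [email], st.2.2)
  else
    (st.1, st.2.1, st.2.2 ++ [email])

-- literal transliteration of A: one pass filling three lists, then personal + business + other
def prioritize_emails_py (emails : List String) (website : String) : List String :=
  let r := emails.foldl pvStepA ([], [], [])
  r.1 ++ r.2.1 ++ r.2.2

-- ===== PORT B =====
-- the module-level _KEYWORDS tuple of Source B
def pvKeywords : List String := ["sales", "business", "owner", "ceo", "president", "founder"]

-- Source B's _local_part: email.split('@')[0].lower()
def pvLocalPart (email : String) : String :=
  PySem.Str.lower (((PySem.Str.split? email "@").getD []).getD 0 "")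

-- Source B's _priority: 0 if '.' occurs in the local part, else 1 on the first matching
-- keyword of the for-loop (List.find?), else 2
def pvPriority (email : String) : Int :=
  let lp := pvLocalPart email
  if PySem.Str.isIn "." lp then 0
  else if (pvKeywords.find? (fun keyword => PySem.Str.isIn keyword lp)).isSome then 1
  else 2

-- sorted(emails, key=_priority): Python's stable sort
def prioritize_emails_py_alt (emails : List String) (website : String) : List String :=
  PySem.List.sorted emails pvPriority false

-- ===== PRECONDITION & SPEC =====
def Spec_prioritize_emails_py (emails : List String) (website : String) (out : List String) : Prop := out = prioritize_emails_py_alt emails website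
instance (emails : List String) (website : String) (out : List String) : Decidable (Spec_prioritize_emails_py emails website out) := by unfold Spec_prioritize_emails_py; infer_instance

-- ===== CLAIM (what is proved, stated in full; the proofs are below) =====
def Claim_equal_prioritize_emails_py : Prop := ∀ (emails : List String) (website : String), Dom_prioritize_emails_py emails website → Spec_prioritize_emails_py emails website (prioritize_emails_py emails website)

-- ===== LEMMAS AND PROOFS =====

-- splitOn's worker never returns fewer than acc.length + 1 pieces
theorem pvGoLenGe (sep : List Char) :
    ∀ (fuel : Nat) (l cur : List Char) (acc : List (List Char)),
      acc.length + 1 ≤ (PySem.Chars.splitOn.go sep fuel l cur acc).length := by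
  intro fuel
  induction fuel with
  | zero => intro l cur acc; simp [PySem.Chars.splitOn.go]
  | succ fuel ih =>
      intro l cur acc
      cases l with
      | nil => simp [PySem.Chars.splitOn.go]
      | cons c rest =>
          show (if sep.isPrefixOf (c :: rest) = true then
              PySem.Chars.splitOn.go sep fuel (List.drop sep.length (c :: rest)) [] (cur.reverse :: acc)
            else PySem.Chars.splitOn.go sep fuel rest (c :: cur) acc).length ≥ _
          split_ifs with h
          · have := ih (List.drop sep.length (c :: rest)) [] (cur.reverse :: acc)
            simp at this; omega
          · exact ih rest (c :: cur) acc

-- if '.' occurs in l (and the fuel suffices), the worker returns at least acc.length + 2 pieces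
theorem pvGoLenTwo :
    ∀ (fuel : Nat) (l cur : List Char) (acc : List (List Char)),
      l.length ≤ fuel → ['.'] <:+: l →
      acc.length + 2 ≤ (PySem.Chars.splitOn.go ['.'] fuel l cur acc).length := by
  intro fuel
  induction fuel with
  | zero =>
      intro l cur acc hlen hinf
      have hl : l = [] := List.eq_nil_of_length_eq_zero (by omega)
      subst hl; simp at hinf
  | succ fuel ih =>
      intro l cur acc hlen hinf
      cases l with
      | nil => simp at hinf
      | cons c rest =>
          show (if List.isPrefixOf ['.'] (c :: rest) = true then
              PySem.Chars.splitOn.go ['.'] fuel (List.drop 1 (c :: rest)) [] (cur.reverse :: acc)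
            else PySem.Chars.splitOn.go ['.'] fuel rest (c :: cur) acc).length ≥ _
          split_ifs with h
          · have := pvGoLenGe ['.'] fuel (List.drop 1 (c :: rest)) [] (cur.reverse :: acc)
            simp only [List.length_cons] at this; omega
          · rcases List.infix_cons_iff.1 hinf with hpre | hinf'
            · exact absurd ((List.isPrefixOf_iff_prefix).2 hpre) (by simpa using h)
            · have := ih rest (c :: cur) acc (by simpa using Nat.lt_succ_iff.1 (by simpa using hlen)) hinf'
              omega

-- '.' in s  →  s.split('.') has at least 2 pieces
theorem pvSplitDotLen (s : String) (h : PySem.Str.isIn "." s = true) :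
    2 ≤ ((PySem.Str.split? s ".").getD []).length := by
  have hinf : ['.'] <:+: s.toList := by
    have := (PySem.Str.isIn_iff_infix (sub := ".") (s := s)).1 h
    simpa using this
  have := pvGoLenTwo (s.toList.length + 1) s.toList [] [] (by omega) hinf
  simpa [PySem.Str.split?, PySem.Chars.split?, PySem.Chars.splitOn] using this

-- hence A's personal-name condition collapses to B's: just "'.' in local_part"
theorem pvCondEq (s : String) :
    (PySem.Str.isIn "." s && decide (2 ≤ ((PySem.Str.split? s ".").getD []).length)) =
      PySem.Str.isIn "." s := by
  cases h : PySem.Str.isIn "." s with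
  | false => simp
  | true => simp [pvSplitDotLen s h]

theorem pvPriority_range (x : String) : pvPriority x = 0 ∨ pvPriority x = 1 ∨ pvPriority x = 2 := by
  simp only [pvPriority]
  split_ifs <;> simp

-- A's loop body, rephrased through B's priority key
theorem pvStepA_eq (st : List String × List String × List String) (email : String) :
    pvStepA st email =
      if pvPriority email = 0 then (st.1 ++ [email], st.2.1, st.2.2)
      else if pvPriority email = 1 then (st.1, st.2.1 ++ [email], st.2.2)
      else (st.1, st.2.1, st.2.2 ++ [email]) := by
  simp only [pvStepA, pvPriority, pvLocalPart, pvKeywords, List.isSome_find?]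
  rw [pvCondEq]
  split_ifs <;> simp_all

-- inserting past a prefix none of whose elements x goes before
theorem pvInsertBy_append_not {α : Type} (before : α → α → Bool) (x : α) (as bs : List α)
    (h : ∀ y ∈ as, before x y = false) :
    PySem.List.insertBy before x (as ++ bs) = as ++ PySem.List.insertBy before x bs := by
  induction as with
  | nil => simp
  | cons a as ih =>
      have ha : before x a = false := h a (by simp)
      simp [PySem.List.insertBy, ha, ih (fun y hy => h y (by simp [hy]))]

-- inserting in front of a block x goes before entirely
theorem pvInsertBy_all_before {α : Type} (before : α → α → Bool) (x : α) (bs : List α)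
    (h : ∀ y ∈ bs, before x y = true) :
    PySem.List.insertBy before x bs = x :: bs := by
  cases bs with
  | nil => rfl
  | cons b bs => simp [PySem.List.insertBy, h b (by simp)]

-- a stable sort by a key valued in {0,1,2} is exactly the three filter-buckets concatenated
theorem pvSorted_bucket (key : String → Int) (hk : ∀ x, key x = 0 ∨ key x = 1 ∨ key x = 2)
    (xs : List String) :
    PySem.List.sorted xs key false =
      xs.filter (fun x => key x == 0) ++ xs.filter (fun x => key x == 1) ++
        xs.filter (fun x => key x == 2) := by
  induction xs using List.reverseRecOn with
  | nil => rfl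
  | append_singleton ys x ih =>
      rw [PySem.List.sorted_eq_foldl_insertBy] at ih ⊢
      rw [List.foldl_append, List.foldl_cons, List.foldl_nil, ih]
      have mem0 : ∀ y ∈ ys.filter (fun x => key x == 0), key y = 0 := by
        intro y hy; simpa using (List.of_mem_filter hy)
      have mem1 : ∀ y ∈ ys.filter (fun x => key x == 1), key y = 1 := by
        intro y hy; simpa using (List.of_mem_filter hy)
      have mem2 : ∀ y ∈ ys.filter (fun x => key x == 2), key y = 2 := by
        intro y hy; simpa using (List.of_mem_filter hy)
      rcases hk x with h0 | h1 | h2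
      · rw [List.append_assoc,
          pvInsertBy_append_not _ _ _ _ (by intro y hy; simp [h0, mem0 y hy]),
          pvInsertBy_all_before _ _ _ (by
            intro y hy
            rcases List.mem_append.1 hy with hy | hy
            · simp [h0, mem1 y hy]
            · simp [h0, mem2 y hy])]
        simp [List.filter_append, h0]
      · rw [pvInsertBy_append_not _ _ _ _ (by
            intro y hy
            rcases List.mem_append.1 hy with hy | hy
            · simp [h1, mem0 y hy]
            · simp [h1, mem1 y hy]),
          pvInsertBy_all_before _ _ _ (by intro y hy; simp [h1, mem2 y hy])]
        simp [List.filter_append, h1]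
      · rw [PySem.List.insertBy_of_forall_not_before _ _ _ (by
          intro y hy
          rcases List.mem_append.1 hy with hy | hy
          · rcases List.mem_append.1 hy with hy | hy
            · simp [h2, mem0 y hy]
            · simp [h2, mem1 y hy]
          · simp [h2, mem2 y hy])]
        simp [List.filter_append, h2]

-- A's fold maintains the three buckets as key-filters of the processed prefix
theorem pvFoldA (xs : List String) :
    ∀ p b o : List String,
      xs.foldl pvStepA (p, b, o) =
        (p ++ xs.filter (fun x => pvPriority x == 0),
         b ++ xs.filter (fun x => pvPriority x == 1),
         o ++ xs.filter (fun x => pvPriority x == 2)) := by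
  induction xs with
  | nil => simp
  | cons x xs ih =>
      intro p b o
      rw [List.foldl_cons, pvStepA_eq]
      rcases pvPriority_range x with hx | hx | hx <;>
        simp [hx, ih]

-- ===== VERDICT (by name: the statement is the Claim_ definition above) =====
theorem prioritize_emails_py_spec : Claim_equal_prioritize_emails_py := by
  intro emails website _
  show prioritize_emails_py emails website = prioritize_emails_py_alt emails website
  rw [prioritize_emails_py, prioritize_emails_py_alt,
    pvSorted_bucket pvPriority pvPriority_range emails]
  simp [pvFoldA emails [] [] []]
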